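-- pv_equiv track=rewrite | github.com/TiloRC/sympy | sympy/assumptions/tests/assumption_test_rewriter.py | _comment_out_bad_lines
-- ===== SOURCE A (Python) =====
-- def _comment_out_bad_lines(input_string, bad_strings):
--     """
--     Comments out each line in the input string that contains at least one of the bad strings.
--
--     :param input_string: The input string with multiple lines.
--     :param bad_strings: A list of strings to check for in each line.
--     :return: A new string with bad lines commented out.
--     """
--     lines = input_string.splitlines()
--     commented_lines = []
--
--     for line in lines:
--         if any(bad_str in line for bad_str in bad_strings):
--             commented_lines.append(f"# {line}")
--         else:
--             commented_lines.append(line)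
--
--     return "\n".join(commented_lines)
-- ===== SOURCE B (Python) =====
-- def _build_index(bad_strings):
--     # one-level trie: distinct non-empty patterns grouped by first character
--     index = {}
--     has_empty = False
--     for b in dict.fromkeys(bad_strings):
--         if b:
--             index.setdefault(b[0], []).append(b)
--         else:
--             has_empty = True
--     return index, has_empty
--
--
-- def _line_is_bad(line, index, has_empty):
--     if has_empty:
--         return True
--     # single left-to-right sweep: at each offset try only the patterns starting with that character
--     for j, c in enumerate(line):
--         for b in index.get(c, ()):
--             if line.startswith(b, j):
--                 return True
--     return False
--
--
-- def _comment_out_bad_lines(input_string, bad_strings):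
--     index, has_empty = _build_index(bad_strings)
--     out = []
--     first = True
--     for line in input_string.splitlines():
--         if not first:
--             out.append("\n")
--         out.append("# " + line if _line_is_bad(line, index, has_empty) else line)
--         first = False
--     return "".join(out)
-- ===== Notes on version B (the rewrite author's own statement) =====
-- stated objective: alternative
-- what changed: B replaces the per-pattern 'bad in line' scans by a naive multi-pattern matcher: the patterns are deduplicated and indexed by first character (a one-level trie) once, then each line is swept left to right trying at each offset only the patterns whose first character matches; the output is assembled incrementally with a separator flag instead of list-append plus '\n'.join.
import Mathlib
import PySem

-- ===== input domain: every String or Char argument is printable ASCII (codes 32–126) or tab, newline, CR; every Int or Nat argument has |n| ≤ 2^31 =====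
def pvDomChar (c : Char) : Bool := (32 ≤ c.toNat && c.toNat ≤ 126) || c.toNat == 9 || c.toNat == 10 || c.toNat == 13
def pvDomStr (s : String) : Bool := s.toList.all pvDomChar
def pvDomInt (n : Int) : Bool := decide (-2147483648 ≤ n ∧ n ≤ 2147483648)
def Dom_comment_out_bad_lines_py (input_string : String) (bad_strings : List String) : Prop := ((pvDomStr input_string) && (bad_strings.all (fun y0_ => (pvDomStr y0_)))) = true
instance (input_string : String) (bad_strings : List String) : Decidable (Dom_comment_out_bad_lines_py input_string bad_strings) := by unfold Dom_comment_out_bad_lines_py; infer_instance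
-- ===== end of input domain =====

-- B: deduplicates the patterns into a first-character index (one-level trie) built once, then sweeps
-- each line left to right trying at each offset only the patterns whose first character matches,
-- assembling the output incrementally with a separator flag (objective: alternative).


-- ===== PORT A =====
-- f"# {line}" ported as String.ofList ('#' :: ' ' :: line.toList) — exact for string concatenation
def pvCommentLine (bad_strings : List String) (line : String) : String :=
  if bad_strings.any (fun bad_str => PySem.Str.isIn bad_str line) then
    String.ofList ('#' :: ' ' :: line.toList)
  else line

def comment_out_bad_lines_py (input_string : String) (bad_strings : List String) : String :=
  PySem.Str.join "\n"
    ((PySem.Str.splitlines input_string).foldl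
      (fun commented_lines line => commented_lines ++ [pvCommentLine bad_strings line]) [])

-- ===== PORT B =====
-- _build_index loop body: '' sets has_empty; a non-empty b is appended to its first-char bucket
-- (index.setdefault(c, []).append(b) = Dict.modify c [] (· ++ [b]): overwrite keeps position, new key appends — exact)
def pvIndexStep (p : PySem.Dict Char (List String) × Bool) (b : String) :
    PySem.Dict Char (List String) × Bool :=
  match b.toList with
  | [] => (p.1, true)
  | c :: _ => (p.1.modify c [] (· ++ [b]), p.2)

-- _line_is_bad's sweep: at each offset (= each suffix) try the bucket of the current character
def pvMarked (index : PySem.Dict Char (List String)) : List Char → Bool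
  | [] => false
  | c :: t => (index.getD c []).any (fun b => PySem.Chars.startswith (c :: t) b.toList)
              || pvMarked index t

def pvAltLine (index : PySem.Dict Char (List String)) (has_empty : Bool) (l : List Char) : List Char :=
  if has_empty || pvMarked index l then '#' :: ' ' :: l else l

-- one loop step: out ++ (separator unless first) ++ transformed line, flag drops to false
def pvAltStep (index : PySem.Dict Char (List String)) (has_empty : Bool)
    (p : List Char × Bool) (l : List Char) : List Char × Bool :=
  (p.1 ++ (if p.2 then [] else ['\n']) ++ pvAltLine index has_empty l, false)

-- _build_index: fold over the deduplicated patterns, returning (index, has_empty)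
def pvBuildIndex (bad_strings : List String) : PySem.Dict Char (List String) × Bool :=
  (PySem.List.dedup bad_strings).foldl pvIndexStep (PySem.Dict.mk [], false)

def comment_out_bad_lines_py_alt (input_string : String) (bad_strings : List String) : String :=
  String.ofList
    (((PySem.Chars.splitlines input_string.toList).foldl
      (pvAltStep (pvBuildIndex bad_strings).1 (pvBuildIndex bad_strings).2) ([], true)).1)

-- ===== PRECONDITION & SPEC =====
def Spec_comment_out_bad_lines_py (input_string : String) (bad_strings : List String) (out : String) : Prop := out = comment_out_bad_lines_py_alt input_string bad_strings
instance (input_string : String) (bad_strings : List String) (out : String) : Decidable (Spec_comment_out_bad_lines_py input_string bad_strings out) := by unfold Spec_comment_out_bad_lines_py; infer_instance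

-- ===== CLAIM (what is proved, stated in full; the proofs are below) =====
def Claim_equal_comment_out_bad_lines_py : Prop := ∀ (input_string : String) (bad_strings : List String), Dom_comment_out_bad_lines_py input_string bad_strings → Spec_comment_out_bad_lines_py input_string bad_strings (comment_out_bad_lines_py input_string bad_strings)

-- ===== LEMMAS AND PROOFS =====

-- proof-side helper: the plain position sweep over ALL patterns (no index)
def pvSweep (bad_strings : List String) : List Char → Bool
  | [] => bad_strings.any (fun bad => PySem.Chars.startswith [] bad.toList)
  | c :: t => bad_strings.any (fun bad => PySem.Chars.startswith (c :: t) bad.toList)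
              || pvSweep bad_strings t

-- 'sub in (c :: t)' = a match at offset 0 or a match in the tail
lemma pv_isIn_cons (sub : List Char) (c : Char) (t : List Char) :
    PySem.Chars.isIn sub (c :: t)
      = (PySem.Chars.startswith (c :: t) sub || PySem.Chars.isIn sub t) := by
  rw [Bool.eq_iff_iff, Bool.or_eq_true]
  rw [← PySem.Chars.exists_prefix_drop_iff_isIn, ← PySem.Chars.exists_prefix_drop_iff_isIn,
    PySem.Chars.startswith_iff]
  constructor
  · rintro ⟨j, h⟩
    cases j with
    | zero => exact Or.inl h
    | succ j => exact Or.inr ⟨j, by simpa using h⟩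
  · rintro (h | ⟨j, h⟩)
    · exact ⟨0, h⟩
    · exact ⟨j + 1, by simpa using h⟩

lemma pv_isIn_nil (sub : List Char) :
    PySem.Chars.isIn sub [] = PySem.Chars.startswith [] sub := by
  rw [Bool.eq_iff_iff, ← PySem.Chars.exists_prefix_drop_iff_isIn, PySem.Chars.startswith_iff]
  simp

-- the plain sweep finds exactly the lines some pattern occurs in
lemma pvSweep_eq (bad_strings : List String) (cs : List Char) :
    pvSweep bad_strings cs
      = bad_strings.any (fun bad => PySem.Chars.isIn bad.toList cs) := by
  induction cs with
  | nil => simp [pvSweep, pv_isIn_nil]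
  | cons c t ih =>
    simp only [pvSweep, ih, pv_isIn_cons]
    rw [Bool.eq_iff_iff]
    simp only [Bool.or_eq_true, List.any_eq_true]
    constructor
    · rintro (⟨b, hb, h⟩ | ⟨b, hb, h⟩)
      · exact ⟨b, hb, by simp [h]⟩
      · exact ⟨b, hb, by simp [h]⟩
    · rintro ⟨b, hb, h⟩
      rcases h with h | h
      · exact Or.inl ⟨b, hb, h⟩
      · exact Or.inr ⟨b, hb, h⟩

-- the index-building fold: each bucket collects, in order, the processed strings with that first char
lemma pv_idx_getD (xs : List String) (d : PySem.Dict Char (List String)) (e : Bool) (c : Char) :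
    ((xs.foldl pvIndexStep (d, e)).1).getD c []
      = d.getD c [] ++ xs.filter (fun b => b.toList.head? == some c) := by
  induction xs generalizing d e with
  | nil => simp
  | cons b t ih =>
    rcases hb : b.toList with _ | ⟨c', r⟩
    · simp [pvIndexStep, hb, ih]
    · simp only [List.foldl_cons, pvIndexStep, hb, PySem.Dict.modify, ih, List.filter_cons]
      rw [PySem.Dict.getD_insert]
      by_cases hc : c = c'
      · simp [hc]
      · simp [hc, Ne.symm hc]

-- the index-building fold: the flag records whether '' was seen
lemma pv_idx_flag (xs : List String) (d : PySem.Dict Char (List String)) (e : Bool) :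
    ((xs.foldl pvIndexStep (d, e)).2) = (e || xs.any (fun b => b.toList.isEmpty)) := by
  induction xs generalizing d e with
  | nil => simp
  | cons b t ih =>
    rcases hb : b.toList with _ | ⟨c', r⟩ <;>
      simp [pvIndexStep, hb, ih]

-- the has_empty check plus the bucket sweep equal the plain all-pattern sweep
lemma pvMarked_eq_sweep (bad_strings : List String) (cs : List Char) :
    ((pvBuildIndex bad_strings).2 || pvMarked ((pvBuildIndex bad_strings).1) cs)
      = pvSweep bad_strings cs := by
  unfold pvBuildIndex
  induction cs with
  | nil =>
    rw [pv_idx_flag]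
    simp only [pvMarked, pvSweep, Bool.or_false, Bool.false_or]
    rw [Bool.eq_iff_iff]
    simp only [List.any_eq_true, PySem.List.mem_dedup]
    constructor
    · rintro ⟨b, hb, h⟩
      refine ⟨b, hb, ?_⟩
      have hbl : b.toList = [] := List.isEmpty_iff.mp h
      simp [PySem.Chars.startswith, hbl]
    · rintro ⟨b, hb, h⟩
      refine ⟨b, hb, ?_⟩
      have hpre : b.toList <+: [] := by
        rw [← List.isPrefixOf_iff_prefix]
        simpa [PySem.Chars.startswith] using h
      simp [List.prefix_nil.mp hpre]
  | cons c t ih =>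
    simp only [pvMarked, pvSweep]
    have hsplit : ∀ (e x y : Bool), (e || (x || y)) = ((e || x) || (e || y)) := by decide
    rw [hsplit, ih]
    congr 1
    -- remaining: has_empty || bucket.any startswith = all-patterns any startswith at this suffix
    rw [pv_idx_flag, pv_idx_getD, Bool.false_or,
      show (PySem.Dict.mk ([] : List (Char × List String))).getD c [] = [] from rfl,
      List.nil_append, List.any_filter, Bool.eq_iff_iff]
    simp only [Bool.or_eq_true, List.any_eq_true, PySem.List.mem_dedup, Bool.and_eq_true,
      beq_iff_eq]
    constructor
    · rintro (⟨b, hb, h⟩ | ⟨b, hb, _, hsw⟩)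
      · refine ⟨b, hb, ?_⟩
        have hbl : b.toList = [] := List.isEmpty_iff.mp h
        simp [PySem.Chars.startswith, hbl]
      · exact ⟨b, hb, hsw⟩
    · rintro ⟨b, hb, h⟩
      rcases hbl : b.toList with _ | ⟨c', r⟩
      · exact Or.inl ⟨b, hb, by simp [hbl]⟩
      · refine Or.inr ⟨b, hb, ?_, h⟩
        have hpre : (c' :: r) <+: (c :: t) := by
          rw [← List.isPrefixOf_iff_prefix]
          simpa [PySem.Chars.startswith, hbl] using h
        simp [hbl, (List.cons_prefix_cons.mp hpre).1]

lemma pv_join_newline (x : List Char) (xs : List (List Char)) :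
    PySem.Chars.join ['\n'] (x :: xs) = x ++ xs.flatMap (fun y => '\n' :: y) := by
  induction xs generalizing x with
  | nil => simp [PySem.Chars.join, List.intercalate]
  | cons y t ih => simp [PySem.Chars.join, List.intercalate] at ih ⊢; simp [ih]

lemma pv_foldl_step_false (index : PySem.Dict Char (List String)) (has_empty : Bool)
    (ls : List (List Char)) (acc : List Char) :
    ((ls.foldl (pvAltStep index has_empty) (acc, false)).1)
      = acc ++ ls.flatMap (fun l => '\n' :: pvAltLine index has_empty l) := by
  induction ls generalizing acc with
  | nil => simp
  | cons l t ih => simp [pvAltStep, ih]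

-- the B loop produces exactly '\n'-joined transformed lines
lemma pv_foldl_step (index : PySem.Dict Char (List String)) (has_empty : Bool)
    (ls : List (List Char)) :
    ((ls.foldl (pvAltStep index has_empty) ([], true)).1)
      = PySem.Chars.join ['\n'] (ls.map (pvAltLine index has_empty)) := by
  cases ls with
  | nil => simp [PySem.Chars.join, List.intercalate]
  | cons l t =>
    simp only [List.foldl_cons, pvAltStep, pv_foldl_step_false]
    rw [List.map_cons, pv_join_newline]
    simp [List.flatMap_map]

-- A's transformed line, seen through toList, is B's transformed line
lemma pv_line_eq (bad_strings : List String) (l : List Char) :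
    (pvCommentLine bad_strings (String.ofList l)).toList
      = pvAltLine ((pvBuildIndex bad_strings).1) ((pvBuildIndex bad_strings).2) l := by
  simp only [pvCommentLine, pvAltLine, pvMarked_eq_sweep, pvSweep_eq]
  split_ifs with h₁ h₂ h₂ <;> simp_all [PySem.Str.isIn]

-- ===== VERDICT (by name: the statement is the Claim_ definition above) =====
theorem comment_out_bad_lines_py_spec : Claim_equal_comment_out_bad_lines_py := by
  intro input_string bad_strings _
  unfold Spec_comment_out_bad_lines_py comment_out_bad_lines_py comment_out_bad_lines_py_alt
  rw [PySem.List.foldl_append_singleton_eq_map, pv_foldl_step]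
  simp only [PySem.Str.join, PySem.Str.splitlines, List.map_map, List.nil_append]
  congr 1
  congr 1
  apply List.map_congr_left
  intro l _
  exact pv_line_eq bad_strings l
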